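-- pv_equiv track=rewrite | github.com/alexdrossos/Python_Scrabble | wordscore.py | getValidWords
-- ===== SOURCE A (Python) =====
-- def getValidWords(rack,ScrList,wcChars):
--     '''
--     This function loops through each word in the scrabble dictionary and checks if
--     it's a valid word for the rack to be able to make. It returns each valid word with
--     the wc characters used in a list of tuples format
--     '''
--     WordsAndWcUsed = []
--     for vWord in ScrList:
--         #assign copies of rack and wcChars so we can manipulate them in the loops
--         orgWcChars = wcChars
--         orgRack = rack
--         wcUsed = []
--         Match = True
--         #go through each letter in the current word to see if it's in the rack
--         for letter in vWord:
--             if letter in orgRack:   #if it is, take it out of the rack for the next iteration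
--                 orgRack = orgRack.replace(letter, '', 1)
--             else:   #if it's not, not a match so break
--                 Match = False
--                 break
--             if letter in orgWcChars:    #if you use the WC to make the word, add it to the wcUsed list for scoring
--                 wcUsed.append(letter)
--                 orgWcChars = orgWcChars.replace(letter, '', 1)
--         if Match == True:
--             vWordLw = vWord.lower()
--             wcString = ""
--             wcString = wcString.join(wcUsed)
--             wcStringFinal = wcString.lower()
--             #this function will output a list of tuples with each element being
--             #(valid word, wcChars that were used)
--             data = (vWordLw,wcStringFinal)
--             WordsAndWcUsed.append(data)
--         else:
--             continue
--     return WordsAndWcUsed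
-- ===== SOURCE B (Python) =====
-- def getValidWords(rack, ScrList, wcChars):
--     '''Count-based re-implementation: compare letter multisets instead of
--     destructively removing letters from copies of the rack.'''
--     rackCount = {}
--     for c in rack:
--         rackCount[c] = rackCount.get(c, 0) + 1
--     wcCount = {}
--     for c in wcChars:
--         wcCount[c] = wcCount.get(c, 0) + 1
--     result = []
--     for vWord in ScrList:
--         wordCount = {}
--         for c in vWord:
--             wordCount[c] = wordCount.get(c, 0) + 1
--         if all(rackCount.get(c, 0) >= n for c, n in wordCount.items()):
--             remaining = dict(wcCount)
--             wcUsed = []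
--             for c in vWord:
--                 if remaining.get(c, 0) > 0:
--                     wcUsed.append(c)
--                     remaining[c] = remaining[c] - 1
--             result.append((vWord.lower(), ''.join(wcUsed).lower()))
--     return result
-- ===== Notes on version B (the rewrite author's own statement) =====
-- stated objective: faster
-- what changed: B replaces A's per-word destructive letter-removal loop (repeated substring search and string rebuilding on copies of the rack, with early break) by a multiset count comparison against letter-count dicts built once, plus a separate greedy pass over the word with a decrementing wildcard counter to collect wcUsed.
import Mathlib
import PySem

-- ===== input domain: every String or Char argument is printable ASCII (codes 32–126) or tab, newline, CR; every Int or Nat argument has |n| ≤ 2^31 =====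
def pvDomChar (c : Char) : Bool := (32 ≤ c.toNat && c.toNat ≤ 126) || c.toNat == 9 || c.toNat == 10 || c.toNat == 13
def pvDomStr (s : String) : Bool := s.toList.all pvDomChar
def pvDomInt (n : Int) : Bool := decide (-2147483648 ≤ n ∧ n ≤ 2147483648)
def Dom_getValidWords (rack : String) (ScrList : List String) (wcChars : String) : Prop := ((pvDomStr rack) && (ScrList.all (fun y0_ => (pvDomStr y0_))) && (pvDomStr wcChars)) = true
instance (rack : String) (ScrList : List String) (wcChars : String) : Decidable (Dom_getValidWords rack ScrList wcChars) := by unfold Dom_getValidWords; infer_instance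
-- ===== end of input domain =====

-- B replaces A's destructive remove-letters-with-break loop by a letter-count (multiset)
-- comparison plus a separate greedy wildcard pass; equivalence is proved on all inputs (A is total).


-- ===== PORT A =====
-- inner letter loop of A: state (orgRack, orgWcChars, wcUsed), returning (Match, wcUsed).
-- 'letter in orgRack' is a 1-character substring test = character membership (exact);
-- "orgRack.replace(letter, '', 1)" removes the first occurrence of that character = List.erase (exact).
def pvGoA : List Char → List Char → List Char → List Char → Bool × List Char
  | [], _, _, wcUsed => (true, wcUsed)
  | letter :: rest, orgRack, orgWcChars, wcUsed =>
    if letter ∈ orgRack then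
      if letter ∈ orgWcChars then
        pvGoA rest (orgRack.erase letter) (orgWcChars.erase letter) (wcUsed ++ [letter])
      else
        pvGoA rest (orgRack.erase letter) orgWcChars wcUsed
    else (false, wcUsed)

-- ''.join(wcUsed) over the collected single characters is String.ofList (exact)
def getValidWords (rack : String) (ScrList : List String) (wcChars : String) : List (String × String) :=
  ScrList.foldl (fun WordsAndWcUsed vWord =>
    let res := pvGoA vWord.toList rack.toList wcChars.toList []
    if res.1 then
      WordsAndWcUsed ++ [(PySem.Str.lower vWord, PySem.Str.lower (String.ofList res.2))]
    else WordsAndWcUsed) []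

-- ===== PORT B =====
-- Source B's manual counting dict: d[c] = d.get(c, 0) + 1
def pvCountChars (cs : List Char) : PySem.Dict Char Int :=
  cs.foldl (fun d c => d.insert c (d.getD c 0 + 1)) PySem.Dict.empty

-- Source B's wildcard pass: decrement a copy of the wildcard counter, collecting used letters
def pvWcPassB : List Char → PySem.Dict Char Int → List Char → List Char
  | [], _, wcUsed => wcUsed
  | c :: rest, remaining, wcUsed =>
    if 0 < remaining.getD c 0 then
      pvWcPassB rest (remaining.insert c (remaining.getD c 0 - 1)) (wcUsed ++ [c])
    else pvWcPassB rest remaining wcUsed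

def getValidWords_alt (rack : String) (ScrList : List String) (wcChars : String) : List (String × String) :=
  let rackCount := pvCountChars rack.toList
  let wcCount := pvCountChars wcChars.toList
  ScrList.foldl (fun result vWord =>
    let wordCount := pvCountChars vWord.toList
    if wordCount.items.all (fun p => decide (rackCount.getD p.1 0 ≥ p.2)) then
      let wcUsed := pvWcPassB vWord.toList wcCount []
      result ++ [(PySem.Str.lower vWord, PySem.Str.lower (String.ofList wcUsed))]
    else result) []

-- ===== PRECONDITION & SPEC =====
def Spec_getValidWords (rack : String) (ScrList : List String) (wcChars : String) (out : List (String × String)) : Prop := out = getValidWords_alt rack ScrList wcChars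
instance (rack : String) (ScrList : List String) (wcChars : String) (out : List (String × String)) : Decidable (Spec_getValidWords rack ScrList wcChars out) := by unfold Spec_getValidWords; infer_instance

-- ===== CLAIM (what is proved, stated in full; the proofs are below) =====
def Claim_equal_getValidWords : Prop := ∀ (rack : String) (ScrList : List String) (wcChars : String), Dom_getValidWords rack ScrList wcChars → Spec_getValidWords rack ScrList wcChars (getValidWords rack ScrList wcChars)

-- ===== LEMMAS AND PROOFS =====

-- mathematical reference for the wildcard pass: greedy removal from the remaining wildcard list
def pvGreedy : List Char → List Char → List Char
  | [], _ => []
  | c :: rest, wc => if c ∈ wc then c :: pvGreedy rest (wc.erase c) else pvGreedy rest wc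

theorem pvCountChars_eq_counter (cs : List Char) : pvCountChars cs = PySem.Dict.counter cs :=
  PySem.Dict.foldl_insert_getD_add_one_eq_counter cs

-- A's Match flag is the multiset comparison
theorem pvGoA_fst (cs : List Char) : ∀ (r wc u : List Char),
    (pvGoA cs r wc u).1 = true ↔ ∀ a ∈ cs, cs.count a ≤ r.count a := by
  induction cs with
  | nil => simp [pvGoA]
  | cons c rest ih =>
    intro r wc u
    by_cases hc : c ∈ r
    · have hr : 1 ≤ r.count c := List.count_pos_iff.mpr hc
      have hcount : ∀ a, (r.erase c).count a = if a = c then r.count c - 1 else r.count a := by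
        intro a
        by_cases hac : a = c
        · simp [hac, List.count_erase_self]
        · simp [hac, List.count_erase_of_ne hac]
      have key : (∀ a ∈ rest, rest.count a ≤ (r.erase c).count a) ↔
          (∀ a ∈ c :: rest, (c :: rest).count a ≤ r.count a) := by
        constructor
        · intro h a ha
          by_cases hac : a = c
          · subst hac
            rw [List.count_cons_self]
            by_cases hmem : a ∈ rest
            · have h2 := h a hmem; rw [hcount, if_pos rfl] at h2; omega
            · rw [List.count_eq_zero_of_not_mem hmem]; omega
          · have ha' : a ∈ rest := (List.mem_cons.mp ha).resolve_left hac
            have h2 := h a ha'; rw [hcount, if_neg hac] at h2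
            rw [List.count_cons_of_ne (Ne.symm hac)]; exact h2
        · intro h a ha
          rw [hcount]
          by_cases hac : a = c
          · subst hac
            have h2 := h a List.mem_cons_self
            rw [List.count_cons_self] at h2
            rw [if_pos rfl]; omega
          · have h2 := h a (List.mem_cons_of_mem _ ha)
            rw [List.count_cons_of_ne (Ne.symm hac)] at h2
            rw [if_neg hac]; exact h2
      by_cases hw : c ∈ wc
      · simp only [pvGoA, if_pos hc, if_pos hw]
        rw [ih, key]
      · simp only [pvGoA, if_pos hc, if_neg hw]
        rw [ih, key]
    · simp only [pvGoA, if_neg hc]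
      constructor
      · intro h; simp at h
      · intro h
        have h2 := h c List.mem_cons_self
        rw [List.count_cons_self, List.count_eq_zero_of_not_mem hc] at h2
        omega

-- A's collected wcUsed, when the word matches, is the greedy pass (independent of the rack)
theorem pvGoA_snd (cs : List Char) : ∀ (r wc u : List Char),
    (pvGoA cs r wc u).1 = true → (pvGoA cs r wc u).2 = u ++ pvGreedy cs wc := by
  induction cs with
  | nil => simp [pvGoA, pvGreedy]
  | cons c rest ih =>
    intro r wc u h
    by_cases hc : c ∈ r
    · by_cases hw : c ∈ wc
      · simp only [pvGoA, if_pos hc, if_pos hw] at h ⊢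
        rw [ih _ _ _ h, pvGreedy, if_pos hw]
        simp
      · simp only [pvGoA, if_pos hc, if_neg hw] at h ⊢
        rw [ih _ _ _ h, pvGreedy, if_neg hw]
    · simp [pvGoA, if_neg hc] at h

-- B's wildcard pass computes the greedy pass whenever the dict is the counter of a list
theorem pvWcPassB_eq (cs : List Char) : ∀ (wc : List Char) (d : PySem.Dict Char Int) (u : List Char),
    (∀ a, d.getD a 0 = (wc.count a : Int)) → pvWcPassB cs d u = u ++ pvGreedy cs wc := by
  induction cs with
  | nil => simp [pvWcPassB, pvGreedy]
  | cons c rest ih =>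
    intro wc d u hinv
    by_cases hw : c ∈ wc
    · have h1 : 1 ≤ wc.count c := List.count_pos_iff.mpr hw
      have hpos : 0 < d.getD c 0 := by rw [hinv]; exact_mod_cast h1
      have hinv' : ∀ a, (d.insert c (d.getD c 0 - 1)).getD a 0 = ((wc.erase c).count a : Int) := by
        intro a
        rw [PySem.Dict.getD_insert]
        by_cases hac : a = c
        · subst hac
          rw [if_pos rfl, hinv, List.count_erase_self]
          push_cast [h1]; ring
        · rw [if_neg hac, hinv, List.count_erase_of_ne hac]
      simp only [pvWcPassB, if_pos hpos, pvGreedy, if_pos hw]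
      rw [ih _ _ _ hinv']
      simp
    · have h0 : wc.count c = 0 := List.count_eq_zero_of_not_mem hw
      have hnpos : ¬ 0 < d.getD c 0 := by rw [hinv, h0]; simp
      simp only [pvWcPassB, if_neg hnpos, pvGreedy, if_neg hw]
      exact ih _ _ _ hinv

-- B's validity test equals A's Match flag
theorem pvCond_eq (cs r : List Char) (wc u : List Char) :
    ((pvCountChars cs).items.all (fun p => decide ((pvCountChars r).getD p.1 0 ≥ p.2)))
      = (pvGoA cs r wc u).1 := by
  rw [Bool.eq_iff_iff, pvGoA_fst]
  rw [pvCountChars_eq_counter, pvCountChars_eq_counter]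
  simp only [List.all_eq_true, PySem.Dict.items_counter, List.mem_map, decide_eq_true_eq]
  constructor
  · intro h a ha
    have h2 := h (a, (cs.count a : Int)) ⟨a, (PySem.Set.mem_ofList _ _).mpr ha, rfl⟩
    simp only [PySem.Dict.getD_counter, ge_iff_le] at h2
    exact_mod_cast h2
  · rintro h p ⟨a, ha, rfl⟩
    simp only [PySem.Dict.getD_counter, ge_iff_le]
    exact_mod_cast h a ((PySem.Set.mem_ofList _ _).mp ha)

-- ===== VERDICT (by name: the statement is the Claim_ definition above) =====
theorem getValidWords_spec : Claim_equal_getValidWords := by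
  intro rack ScrList wcChars hD
  clear hD
  unfold Spec_getValidWords getValidWords getValidWords_alt
  induction ScrList using List.reverseRecOn with
  | nil => rfl
  | append_singleton l w ih =>
    rw [List.foldl_append, List.foldl_append, ← ih]
    simp only [List.foldl_cons, List.foldl_nil]
    rw [pvCond_eq w.toList rack.toList wcChars.toList []]
    by_cases h : (pvGoA w.toList rack.toList wcChars.toList []).1 = true
    · rw [if_pos h, if_pos h]
      rw [pvGoA_snd _ _ _ _ h,
        pvWcPassB_eq _ wcChars.toList _ [] (by
          intro a
          rw [pvCountChars_eq_counter, PySem.Dict.getD_counter])]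
    · rw [if_neg h, if_neg h]
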